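-- pv_equiv track=rewrite | github.com/gunnu3226/Coding-test | 프로그래머스/unrated/140108. 문자열 나누기/문자열 나누기.py | solution
-- ===== SOURCE A (Python) =====
-- def solution(word):
--     answer = 0
--     word_len = len(word)-1
--     while word_len>0:
--         first = word[0]
--         first_num = 1
--         other_num = 0
--         for i in range(1,len(word)):
--             if word[i] == first and first_num!=other_num:
--                 first_num += 1
--                 word_len -= 1
--             elif word[i] != first and first_num!=other_num:
--                 other_num += 1
--                 word_len -= 1
--             if first_num == other_num:
--                 answer += 1
--                 word = word[i+1:]
--                 word_len = len(word)-1
--                 break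
--     if len(word)!=0:
--         answer +=1
--
--
--     return answer
-- ===== SOURCE B (Python) =====
-- def solution(word):
--     answer = 0
--     first = None
--     a = 0
--     b = 0
--     for c in word:
--         if first is None:
--             first = c
--             a, b = 1, 0
--         else:
--             if c == first:
--                 a += 1
--             else:
--                 b += 1
--             if a == b:
--                 answer += 1
--                 first = None
--     if first is not None:
--         answer += 1
--     return answer
-- ===== Notes on version B (the rewrite author's own statement) =====
-- stated objective: faster
-- what changed: Replaced A's outer while-loop that restarts an inner scan on a sliced copy of the remaining string with a single linear pass maintaining (first char, match count, other count) and resetting on equality.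
import Mathlib
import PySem

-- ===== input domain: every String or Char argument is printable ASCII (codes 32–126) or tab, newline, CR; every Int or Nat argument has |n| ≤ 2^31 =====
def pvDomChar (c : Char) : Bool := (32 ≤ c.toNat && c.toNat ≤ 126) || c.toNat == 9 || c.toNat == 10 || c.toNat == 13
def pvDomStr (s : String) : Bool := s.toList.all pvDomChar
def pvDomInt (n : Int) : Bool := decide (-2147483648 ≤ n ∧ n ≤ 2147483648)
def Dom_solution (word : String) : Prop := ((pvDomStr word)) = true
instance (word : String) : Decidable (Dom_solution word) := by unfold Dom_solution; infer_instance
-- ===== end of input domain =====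

-- B: one linear pass with running counters instead of A's restart-with-slice outer loop.

-- ===== PORT A =====
-- Inner 'for i in range(1, len(word))' loop of A over the tail `cs` of the current word:
-- returns .inr rest if the loop breaks (rest = word[i+1:] as a list tail),
-- .inl the final word_len if the loop runs to the end without breaking.
def innerA (f : Char) : List Char → Int → Int → Int → Int ⊕ List Char
  | [], _, _, wl => .inl wl
  | c :: cs, fn, on, wl =>
    let s : Int × Int × Int :=
      if c = f ∧ fn ≠ on then (fn + 1, on, wl - 1)
      else if c ≠ f ∧ fn ≠ on then (fn, on + 1, wl - 1)
      else (fn, on, wl)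
    if s.1 = s.2.1 then .inr cs else innerA f cs s.1 s.2.1 s.2.2

-- needed for the termination of outerA (the broken-off rest is a tail of the scanned word)
theorem innerA_inr_length (f : Char) : ∀ (cs : List Char) (fn on wl : Int) (rest : List Char),
    innerA f cs fn on wl = .inr rest → rest.length < cs.length + 1 := by
  intro cs
  induction cs with
  | nil => intro fn on wl rest h; simp [innerA] at h
  | cons c cs ih =>
    intro fn on wl rest h
    by_cases hc : c = f <;> by_cases hfo : fn = on <;>
      simp only [innerA, hc, hfo, ne_eq, not_true_eq_false, not_false_eq_true, and_true,
        and_false, if_true, if_false] at h <;>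
      first
      | (injection h with h'; subst h'; simp only [List.length_cons]; omega)
      | (split at h <;>
          first
          | (injection h with h'; subst h'; simp only [List.length_cons]; omega)
          | (have := ih _ _ _ _ h; simp only [List.length_cons]; omega))

-- A's outer 'while word_len > 0' loop; the wl' < wl guard only makes the
-- recursion total (in every reachable state a non-breaking inner pass drives word_len to 0).
def outerA (ans : Int) (word : List Char) (wl : Int) : Int :=
  if wl > 0 then
    match word with
    | [] => ans  -- unreachable: wl > 0 forces a nonempty word in every reachable state
    | f :: rest =>
      match h : innerA f rest 1 0 wl with
      | .inr nw => outerA (ans + 1) nw ((nw.length : Int) - 1)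
      | .inl wl' => if _h2 : wl' < wl then outerA ans (f :: rest) wl' else ans
  else if word.length ≠ 0 then ans + 1 else ans
termination_by (word.length, wl.toNat)
decreasing_by
  · exact Prod.Lex.left _ _ (by have := innerA_inr_length f rest 1 0 wl nw h; simpa using this)
  · exact Prod.Lex.right _ (by omega)

def solution (word : String) : Int :=
  outerA 0 word.toList ((word.toList.length : Int) - 1)

-- ===== PORT B =====
-- single pass: first = the segment's opening char (none = between segments),
-- a = count of chars equal to it, b = count of others; reset and count on a = b.
def altLoop : List Char → Option Char → Int → Int → Int → Int
  | [], first, _, _, ans => if first.isSome then ans + 1 else ans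
  | c :: cs, none, _, _, ans => altLoop cs (some c) 1 0 ans
  | c :: cs, some f, a, b, ans =>
    let a' := if c = f then a + 1 else a
    let b' := if c = f then b else b + 1
    if a' = b' then altLoop cs none 0 0 (ans + 1) else altLoop cs (some f) a' b' ans

def solution_alt (word : String) : Int :=
  altLoop word.toList none 0 0 0

-- ===== PRECONDITION & SPEC =====
def Spec_solution (word : String) (out : Int) : Prop := out = solution_alt word
instance (word : String) (out : Int) : Decidable (Spec_solution word out) := by unfold Spec_solution; infer_instance

-- ===== CLAIM (what is proved, stated in full; the proofs are below) =====
def Claim_equal_solution : Prop := ∀ (word : String), Dom_solution word → Spec_solution word (solution word)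

-- ===== LEMMAS AND PROOFS =====

-- one step of A's inner loop when the counters are unequal
theorem innerA_cons (f c : Char) (cs : List Char) (fn on wl : Int) (h : fn ≠ on) :
    innerA f (c :: cs) fn on wl =
      if (if c = f then fn + 1 else fn) = (if c = f then on else on + 1) then .inr cs
      else innerA f cs (if c = f then fn + 1 else fn) (if c = f then on else on + 1) (wl - 1) := by
  by_cases hc : c = f <;> simp [innerA, hc, h]

-- one step of B's pass inside a segment
theorem altLoop_cons (c : Char) (cs : List Char) (f : Char) (a b ans : Int) :
    altLoop (c :: cs) (some f) a b ans =
      if (if c = f then a + 1 else a) = (if c = f then b else b + 1)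
      then altLoop cs none 0 0 (ans + 1)
      else altLoop cs (some f) (if c = f then a + 1 else a) (if c = f then b else b + 1) ans := by
  by_cases hc : c = f <;> simp [altLoop, hc]

-- One segment: while the counters stay unequal, A's inner scan and B's pass move in lockstep;
-- if A breaks with rest, B continues on rest with a fresh segment and ans+1;
-- if A's scan ends without breaking, B closes the final (unbalanced) segment with ans+1,
-- and A's word_len has been decremented once per scanned character.
theorem inner_alt (f : Char) : ∀ (cs : List Char) (a b ans wl : Int), a ≠ b →
    (match innerA f cs a b wl with
     | .inl wl' => altLoop cs (some f) a b ans = ans + 1 ∧ wl' = wl - cs.length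
     | .inr rest => altLoop cs (some f) a b ans = altLoop rest none 0 0 (ans + 1)) := by
  intro cs
  induction cs with
  | nil => intro a b ans wl hab; simp [innerA, altLoop]
  | cons c cs ih =>
    intro a b ans wl hab
    rw [innerA_cons f c cs a b wl hab, altLoop_cons c cs f a b ans]
    by_cases he : (if c = f then a + 1 else a) = (if c = f then b else b + 1)
    · simp only [if_pos he]
    · simp only [if_neg he]
      have key := ih (if c = f then a + 1 else a) (if c = f then b else b + 1) ans (wl - 1) he
      rcases hI : innerA f cs (if c = f then a + 1 else a) (if c = f then b else b + 1) (wl - 1)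
        with wl' | rest <;> rw [hI] at key <;> simp only
      · refine ⟨key.1, ?_⟩
        have := key.2
        simp only [List.length_cons] at *
        omega
      · exact key

theorem outer_alt : ∀ (n : Nat) (word : List Char) (ans : Int), word.length ≤ n →
    outerA ans word ((word.length : Int) - 1) = altLoop word none 0 0 ans := by
  intro n
  induction n with
  | zero =>
    intro word ans hlen
    have : word = [] := List.length_eq_zero_iff.mp (Nat.le_zero.mp hlen)
    subst this
    simp [outerA, altLoop]
  | succ n ih =>
    intro word ans hlen
    match word with
    | [] => simp [outerA, altLoop]
    | [f] =>
      rw [outerA]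
      simp [altLoop]
    | f :: c :: cs =>
      have hwl : ((f :: c :: cs).length : Int) - 1 > 0 := by simp only [List.length_cons]; omega
      rw [outerA, if_pos hwl]
      have key := inner_alt f (c :: cs) 1 0 ans (((f :: c :: cs).length : Int) - 1) (by norm_num)
      have hstep : altLoop (f :: c :: cs) none 0 0 ans = altLoop (c :: cs) (some f) 1 0 ans := by
        simp [altLoop]
      rw [hstep]
      rcases hres : innerA f (c :: cs) 1 0 (((f :: c :: cs).length : Int) - 1) with wl' | nw <;>
        rw [hres] at key <;> simp only
      · -- no break: word_len has reached 0, the while loop exits, len(word) ≠ 0 adds 1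
        obtain ⟨halt, hwl'⟩ := key
        have hwl0 : wl' = 0 := by
          simp only [List.length_cons] at hwl' ⊢
          omega
        rw [dif_pos (by omega : wl' < ((f :: c :: cs).length : Int) - 1)]
        rw [outerA, if_neg (by omega), if_pos (by simp)]
        exact halt.symm
      · -- break: restart on the rest, which is strictly shorter
        have hlt := innerA_inr_length f (c :: cs) 1 0 _ _ hres
        rw [ih nw (ans + 1) (by simp at hlen hlt ⊢; omega)]
        exact key.symm

-- ===== VERDICT (by name: the statement is the Claim_ definition above) =====
theorem solution_spec : Claim_equal_solution := by
  intro word _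
  unfold Spec_solution solution solution_alt
  exact outer_alt word.toList.length word.toList 0 le_rfl
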